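-- pv_equiv track=rewrite | github.com/Onlysudden/Study_Time | Solved_tasks/Испытания/Списки/func_find_longest_length.py | find_longest_length
-- ===== SOURCE A (Python) =====
-- def find_longest_length(stroka):
-- 	max_count = 0
-- 	for i in range(len(stroka) - 1):
-- 		if max_count < len(stroka[i:]):
-- 			if stroka.count(stroka[i], i + 1) >= 1:
-- 				j = stroka.find(stroka[i], i + 1)
-- 				one_count = len(stroka[i:j])
-- 				two_count = len(stroka[j:])
-- 				if max_count < one_count or max_count < two_count:
-- 					max_count = max(one_count, two_count)
-- 			else:
-- 				third_count = len(stroka[i:])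
-- 				if max_count < third_count:
-- 					max_count = third_count
-- 	return max_count
-- ===== SOURCE B (Python) =====
-- def find_longest_length(stroka):
--     n = len(stroka)
--     nxt = {}
--     best = 0
--     for i in range(n - 1, -1, -1):
--         c = stroka[i]
--         j = nxt.get(c)
--         if i < n - 1:
--             cand = n - i if j is None else max(j - i, n - j)
--             if cand > best:
--                 best = cand
--         nxt[c] = i
--     return best
-- ===== Notes on version B (the rewrite author's own statement) =====
-- stated objective: faster
-- what changed: A rescans the string with count/find (and slice-length computations) for every index; B makes a single right-to-left pass keeping a dict of the next occurrence of each character and folds the per-index candidate into a running maximum, turning O(n^2) into O(n).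
import Mathlib
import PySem

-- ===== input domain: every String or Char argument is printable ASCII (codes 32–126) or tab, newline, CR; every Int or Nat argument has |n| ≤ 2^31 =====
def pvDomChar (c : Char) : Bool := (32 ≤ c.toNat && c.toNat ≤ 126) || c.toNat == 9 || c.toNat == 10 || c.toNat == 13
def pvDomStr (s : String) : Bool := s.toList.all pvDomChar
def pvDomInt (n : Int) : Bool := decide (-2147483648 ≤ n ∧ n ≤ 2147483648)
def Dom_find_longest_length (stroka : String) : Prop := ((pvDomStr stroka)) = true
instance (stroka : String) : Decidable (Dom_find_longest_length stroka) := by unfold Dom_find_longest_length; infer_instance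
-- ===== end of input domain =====

-- B replaces A's per-index count/find rescans (O(n^2)) by one right-to-left pass that keeps, in a dict,
-- the next occurrence of each character; measured faster (asymptotic, O(n)). Return values proved equal.

-- ===== PORT A =====
-- Python A, step for step on stroka.toList.  s.count(c, i+1) is ported as count of the slice s[i+1:]
-- (exact: Python defines count with a start as the count in that slice).  stroka[i] is ported with getD
-- (exact: 0 ≤ i < len(stroka) for every i the range produces).
def find_longest_length (stroka : String) : Int :=
  let s := stroka.toList
  let n : Int := (s.length : Int)
  (PySem.List.pyRange 0 (n - 1)).foldl (fun max_count i =>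
    if max_count < ((PySem.List.slice s (some i) none).length : Int) then
      if 1 ≤ PySem.Chars.count (PySem.List.slice s (some (i + 1)) none) [s.getD i.toNat ' '] then
        let j := PySem.Chars.findFrom s [s.getD i.toNat ' '] (i + 1)
        let one_count : Int := ((PySem.List.slice s (some i) (some j)).length : Int)
        let two_count : Int := ((PySem.List.slice s (some j) none).length : Int)
        if max_count < one_count ∨ max_count < two_count then max one_count two_count else max_count
      else
        let third_count : Int := ((PySem.List.slice s (some i) none).length : Int)
        if max_count < third_count then third_count else max_count
    else max_count) 0

-- ===== PORT B =====
-- my Source B, step for step: one fold over range(n-1, -1, -1) carrying (nxt : dict, best).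
def find_longest_length_alt (stroka : String) : Int :=
  let s := stroka.toList
  let n : Int := (s.length : Int)
  ((PySem.List.pyRange (n - 1) (-1) (-1)).foldl (fun (st : PySem.Dict Char Int × Int) i =>
      let c := s.getD i.toNat ' '          -- stroka[i]; exact: every produced i has 0 ≤ i < len
      let j := st.1.get? c                 -- nxt.get(c)
      let best :=
        if i < n - 1 then
          let cand := match j with
            | none => n - i
            | some jv => max (jv - i) (n - jv)
          if st.2 < cand then cand else st.2
        else st.2
      (st.1.insert c i, best))             -- nxt[c] = i
    (PySem.Dict.empty, 0)).2

-- ===== PRECONDITION & SPEC =====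
def Spec_find_longest_length (stroka : String) (out : Int) : Prop := out = find_longest_length_alt stroka
instance (stroka : String) (out : Int) : Decidable (Spec_find_longest_length stroka out) := by unfold Spec_find_longest_length; infer_instance

-- ===== CLAIM (what is proved, stated in full; the proofs are below) =====
def Claim_equal_find_longest_length : Prop := ∀ (stroka : String), Dom_find_longest_length stroka → Spec_find_longest_length stroka (find_longest_length stroka)

-- ===== LEMMAS AND PROOFS =====

-- first index of c in t, as a reference function
def pvFirst (t : List Char) (c : Char) : Option Nat :=
  match t with
  | [] => none
  | h :: r => if h = c then some 0 else (pvFirst r c).map (· + 1)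

theorem pvFirst_none_iff (t : List Char) (c : Char) : pvFirst t c = none ↔ c ∉ t := by
  induction t with
  | nil => simp [pvFirst]
  | cons h r ih =>
    simp only [pvFirst, List.mem_cons]
    by_cases hc : h = c
    · simp [hc]
    · simp [hc, ih, Option.map_eq_none_iff]
      tauto

theorem pvFirst_some_lt (t : List Char) (c : Char) (m : Nat) (h : pvFirst t c = some m) :
    m < t.length := by
  induction t generalizing m with
  | nil => simp [pvFirst] at h
  | cons hd r ih =>
    simp only [pvFirst] at h
    by_cases hc : hd = c
    · rw [if_pos hc] at h
      injection h with h
      subst h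
      simp
    · simp only [hc, if_false, Option.map_eq_some_iff] at h
      obtain ⟨a, ha, rfl⟩ := h
      have := ih a ha
      simp; omega

-- Chars.count of a single-character needle is List.count
theorem count_go_singleton (c : Char) (t : List Char) (fuel acc : Nat) (h : t.length ≤ fuel) :
    PySem.Chars.count.go [c] fuel t acc = acc + t.count c := by
  induction t generalizing fuel acc with
  | nil => rw [PySem.Chars.count.go.eq_def]; cases fuel <;> simp
  | cons hd r ih =>
    cases fuel with
    | zero => simp at h
    | succ f =>
      rw [PySem.Chars.count.go.eq_def]
      have hlen : r.length ≤ f := by simp at h; omega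
      by_cases hc : c = hd
      · subst hc
        have hpre : [c].isPrefixOf (c :: r) = true := by simp [List.isPrefixOf]
        simp only [hpre, if_true, List.length_cons, List.length_nil, List.drop_succ_cons,
          List.drop_zero]
        rw [ih f (acc + 1) hlen]
        simp [List.count_cons]
        omega
      · have hpre : [c].isPrefixOf (hd :: r) = false := by simp [List.isPrefixOf, hc]
        simp only [hpre, Bool.false_eq_true, if_false]
        rw [ih f acc hlen]
        simp [Ne.symm hc]

theorem count_singleton (t : List Char) (c : Char) :
    PySem.Chars.count t [c] = t.count c := by
  unfold PySem.Chars.count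
  simp only [List.isEmpty_cons]
  rw [count_go_singleton c t t.length 0 le_rfl]
  simp

-- Chars.find of a single-character needle is pvFirst
theorem find_go_singleton (c : Char) (t : List Char) (k : Nat) :
    PySem.Chars.find.go [c] t k = (pvFirst t c).elim (-1) (fun m => ((k + m : Nat) : Int)) := by
  induction t generalizing k with
  | nil => rw [PySem.Chars.find.go.eq_def]; simp [pvFirst]
  | cons hd r ih =>
    rw [PySem.Chars.find.go.eq_def]
    simp only [pvFirst]
    by_cases hc : hd = c
    · subst hc
      simp [List.isPrefixOf]
    · have hpre : ([c].isPrefixOf (hd :: r)) = false := by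
        simp [List.isPrefixOf, Ne.symm hc]
      simp only [hpre, Bool.false_eq_true, if_false, ih (k + 1), hc, if_false]
      cases hfr : pvFirst r c with
      | none => simp
      | some m => simp; omega

theorem find_singleton (t : List Char) (c : Char) :
    PySem.Chars.find t [c] = (pvFirst t c).elim (-1) (fun m => (m : Int)) := by
  unfold PySem.Chars.find
  rw [find_go_singleton]
  cases pvFirst t c <;> simp

-- the candidate value both programs compute for index i
def pvCand (s : List Char) (i : Nat) : Int :=
  match pvFirst (s.drop (i + 1)) (s.getD i ' ') with
  | none => (s.length : Int) - i
  | some m => max ((m : Int) + 1) ((s.length : Int) - ((i : Int) + 1 + m))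

theorem pvCand_le (s : List Char) (i : Nat) (h : i < s.length) :
    pvCand s i ≤ (s.length : Int) - i := by
  unfold pvCand
  cases hf : pvFirst (s.drop (i + 1)) (s.getD i ' ') with
  | none => simp
  | some m =>
    have := pvFirst_some_lt _ _ _ hf
    simp only [List.length_drop] at this
    simp only [max_le_iff]
    constructor <;> [skip; skip] <;> push_cast <;> omega

-- max-fold utilities
theorem foldl_max_shift (g : Nat → Int) (l : List Nat) (a b : Int) :
    l.foldl (fun x i => max x (g i)) (max a b) = max (l.foldl (fun x i => max x (g i)) a) b := by
  induction l generalizing a with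
  | nil => rfl
  | cons h t ih => simp only [List.foldl_cons, max_right_comm a b (g h), ih]

theorem foldl_max_reverse (g : Nat → Int) (l : List Nat) (a : Int) :
    l.reverse.foldl (fun x i => max x (g i)) a = l.foldl (fun x i => max x (g i)) a := by
  induction l generalizing a with
  | nil => rfl
  | cons h t ih =>
    simp only [List.reverse_cons, List.foldl_append, List.foldl_cons, List.foldl_nil, ih]
    rw [← foldl_max_shift g t a (g h)]

-- ===== A-side reduction =====
theorem stepA_eq (s : List Char) (k : Nat) (hk : k + 1 < s.length) (a : Int) :
    (if a < ((PySem.List.slice s (some (k : Int)) none).length : Int) then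
      if 1 ≤ PySem.Chars.count (PySem.List.slice s (some ((k : Int) + 1)) none) [s.getD k ' '] then
        let j := PySem.Chars.findFrom s [s.getD k ' '] ((k : Int) + 1)
        let one_count : Int := ((PySem.List.slice s (some (k : Int)) (some j)).length : Int)
        let two_count : Int := ((PySem.List.slice s (some j) none).length : Int)
        if a < one_count ∨ a < two_count then max one_count two_count else a
      else
        let third_count : Int := ((PySem.List.slice s (some (k : Int)) none).length : Int)
        if a < third_count then third_count else a
    else a) = max a (pvCand s k) := by
  have hkl : k < s.length := by omega
  have hsl : PySem.List.slice s (some (k : Int)) none = s.drop k :=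
    PySem.List.slice_from_natCast s k
  have hlen : ((s.drop k).length : Int) = (s.length : Int) - k := by
    simp [List.length_drop]; omega
  rw [hsl]
  by_cases ha : a < ((s.drop k).length : Int)
  · rw [if_pos ha]
    have hk1 : ((k : Int) + 1) = ((k + 1 : Nat) : Int) := by push_cast; ring
    rw [hk1, PySem.List.slice_from_natCast s (k + 1), count_singleton]
    set c := s.getD k ' ' with hc
    set t := s.drop (k + 1) with ht
    have htlen : t.length = s.length - (k + 1) := by simp [ht]
    by_cases hmem : c ∈ t
    · rw [if_pos (by simpa [List.count_pos_iff] using hmem)]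
      obtain ⟨m, hm⟩ : ∃ m, pvFirst t c = some m := by
        cases hf : pvFirst t c with
        | none => exact absurd ((pvFirst_none_iff t c).mp hf) (by simpa using hmem)
        | some m => exact ⟨m, rfl⟩
      have hmlt : m < t.length := pvFirst_some_lt t c m hm
      have hff : PySem.Chars.findFrom s [c] ((k + 1 : Nat) : Int) = ((k + 1 + m : Nat) : Int) := by
        rw [PySem.Chars.findFrom_natCast s [c] (k + 1) (by omega), ← ht, find_singleton, hm]
        simp only [Option.elim_some]
        rw [if_neg (by omega)]
        push_cast; ring
      rw [hff]
      have hone : PySem.List.slice s (some (k : Int)) (some ((k + 1 + m : Nat) : Int)) =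
          (s.drop k).take (k + 1 + m - k) := PySem.List.slice_natCast s k (k + 1 + m)
      have honelen : (((s.drop k).take (k + 1 + m - k)).length : Int) = (m : Int) + 1 := by
        simp [List.length_take, List.length_drop]
        omega
      have htwo : PySem.List.slice s (some ((k + 1 + m : Nat) : Int)) none = s.drop (k + 1 + m) :=
        PySem.List.slice_from_natCast s (k + 1 + m)
      have htwolen : ((s.drop (k + 1 + m)).length : Int) = (s.length : Int) - ((k : Int) + 1 + m) := by
        simp [List.length_drop]
        push_cast
        omega
      simp only [hone, htwo, honelen, htwolen]
      unfold pvCand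
      rw [← hc, ← ht, hm]
      have h1 : (m : Int) + 1 ≤ (s.length : Int) - k := by omega
      simp only [max_def]
      split_ifs <;> omega
    · rw [if_neg (by simpa [List.count_pos_iff] using hmem)]
      simp only []
      rw [hlen]
      rw [if_pos (by omega : a < (s.length : Int) - k)]
      unfold pvCand
      rw [← hc, ← ht, (pvFirst_none_iff t c).mpr hmem]
      rw [hlen] at ha
      simp only [max_def]
      split_ifs <;> omega
  · rw [if_neg ha]
    rw [hlen] at ha
    have := pvCand_le s k hkl
    symm
    simp only [max_def]
    split_ifs <;> omega

theorem portA_eq (stroka : String) :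
    find_longest_length stroka =
      (List.range (stroka.toList.length - 1)).foldl
        (fun x i => max x (pvCand stroka.toList i)) 0 := by
  unfold find_longest_length
  dsimp only []
  rw [PySem.List.pyRange_one, List.foldl_map]
  have htn : ((stroka.toList.length : Int) - 1 - 0).toNat = stroka.toList.length - 1 := by omega
  rw [htn]
  apply PySem.List.foldl_congr_mem
  intro acc k hkmem
  have hk : k + 1 < stroka.toList.length := by
    have := List.mem_range.mp hkmem
    omega
  have := stepA_eq stroka.toList k hk acc
  simpa using this

-- ===== B-side reduction =====
-- the fold body of find_longest_length_alt, named (definitionally equal to the port's lambda)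
def pvStepB (s : List Char) (st : PySem.Dict Char Int × Int) (i : Int) : PySem.Dict Char Int × Int :=
  let c := s.getD i.toNat ' '
  let j := st.1.get? c
  let best :=
    if i < (s.length : Int) - 1 then
      let cand := match j with
        | none => (s.length : Int) - i
        | some jv => max (jv - i) ((s.length : Int) - jv)
      if st.2 < cand then cand else st.2
    else st.2
  (st.1.insert c i, best)

theorem pvStepB_fst (s : List Char) (st : PySem.Dict Char Int × Int) (i : Int) :
    (pvStepB s st i).1 = st.1.insert (s.getD i.toNat ' ') i := rfl

theorem pvStepB_snd (s : List Char) (st : PySem.Dict Char Int × Int) (i : Int) :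
    (pvStepB s st i).2 =
      if i < (s.length : Int) - 1 then
        if st.2 < (match st.1.get? (s.getD i.toNat ' ') with
            | none => (s.length : Int) - i
            | some jv => max (jv - i) ((s.length : Int) - jv)) then
          (match st.1.get? (s.getD i.toNat ' ') with
            | none => (s.length : Int) - i
            | some jv => max (jv - i) ((s.length : Int) - jv))
        else st.2
      else st.2 := rfl

theorem B_inv (s : List Char) (m : Nat) (hm : m ≤ s.length) :
    (∀ c, (((List.range m).map (fun (k : Nat) => ((s.length : Int) - 1 - (k : Int)))).foldl (pvStepB s)
            (PySem.Dict.empty, 0)).1.get? c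
        = (pvFirst (s.drop (s.length - m)) c).map (fun a => ((s.length - m + a : Nat) : Int)))
    ∧ (((List.range m).map (fun (k : Nat) => ((s.length : Int) - 1 - (k : Int)))).foldl (pvStepB s)
            (PySem.Dict.empty, 0)).2
        = (List.range m).foldl
            (fun x k => if s.length - 1 - k < s.length - 1 then max x (pvCand s (s.length - 1 - k)) else x) 0 := by
  induction m with
  | zero =>
    constructor
    · intro c
      simp [PySem.Dict.get?_empty, List.drop_length]
      simp [pvFirst]
    · simp
  | succ m ih =>
    obtain ⟨ihd, ihb⟩ := ih (by omega)
    have hmlt : m < s.length := by omega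
    have hiN : s.length - (m + 1) < s.length := by omega
    have hidx : ((s.length : Int) - 1 - (m : Int)).toNat = s.length - 1 - m := by omega
    have hiN' : s.length - 1 - m = s.length - (m + 1) := by omega
    have hdropc : s.drop (s.length - (m + 1))
        = s.getD (s.length - (m + 1)) ' ' :: s.drop (s.length - (m + 1) + 1) := by
      rw [List.drop_eq_getElem_cons hiN, List.getD_eq_getElem s ' ' hiN]
    have hsucc : s.length - (m + 1) + 1 = s.length - m := by omega
    have hgetD : s.getD (s.length - 1 - m) ' ' = s.getD (s.length - (m + 1)) ' ' := by
      rw [hiN']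
    rw [List.range_succ, List.map_append, List.foldl_append, List.foldl_append]
    simp only [List.map_cons, List.map_nil, List.foldl_cons, List.foldl_nil]
    constructor
    · intro c
      rw [pvStepB_fst, PySem.Dict.get?_insert, hidx, hgetD]
      by_cases hc : c = s.getD (s.length - (m + 1)) ' '
      · rw [if_pos hc, hdropc, hc]
        simp [pvFirst]
        omega
      · rw [if_neg hc, ihd c, hdropc]
        simp only [pvFirst, if_neg (fun h : s.getD (s.length - (m + 1)) ' ' = c => hc h.symm)]
        rw [hsucc]
        cases pvFirst (s.drop (s.length - m)) c with
        | none => simp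
        | some a =>
          simp only [Option.map_some, Option.some.injEq]
          congr 1
          omega
    · rw [pvStepB_snd, hidx, hgetD, ihd, ihb]
      by_cases hm0 : 0 < m
      · have hg1 : ((s.length : Int) - 1 - (m : Int)) < (s.length : Int) - 1 := by omega
        have hg2 : s.length - 1 - m < s.length - 1 := by omega
        rw [if_pos hg1, if_pos hg2]
        have hcand : (match (pvFirst (s.drop (s.length - m)) (s.getD (s.length - (m + 1)) ' ')).map
              (fun a => ((s.length - m + a : Nat) : Int)) with
            | none => (s.length : Int) - ((s.length : Int) - 1 - (m : Int))
            | some jv => max (jv - ((s.length : Int) - 1 - (m : Int))) ((s.length : Int) - jv))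
            = pvCand s (s.length - 1 - m) := by
          unfold pvCand
          rw [hiN', ← hsucc]
          cases pvFirst (s.drop (s.length - (m + 1) + 1)) (s.getD (s.length - (m + 1)) ' ') with
          | none =>
            simp only [Option.map_none]
            rw [Nat.cast_sub hm]
            push_cast
            ring
          | some a =>
            simp only [Option.map_some]
            have e1 : ((s.length - (m + 1) + 1 + a : Nat) : Int) - ((s.length : Int) - 1 - (m : Int))
                = (a : Int) + 1 := by omega
            have e2 : (s.length : Int) - ((s.length - (m + 1) + 1 + a : Nat) : Int)
                = (s.length : Int) - (((s.length - (m + 1) : Nat) : Int) + 1 + (a : Int)) := by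
              push_cast
              omega
            rw [e1, e2]
        rw [hcand]
        rcases lt_or_ge ((List.range m).foldl
            (fun x k => if s.length - 1 - k < s.length - 1 then max x (pvCand s (s.length - 1 - k)) else x) 0)
            (pvCand s (s.length - 1 - m)) with hlt | hge
        · rw [if_pos hlt, max_eq_right (le_of_lt hlt)]
        · rw [if_neg (not_lt.mpr hge), max_eq_left hge]
      · have hm00 : m = 0 := by omega
        subst hm00
        have hg1 : ¬ ((s.length : Int) - 1 - ((0 : Nat) : Int)) < (s.length : Int) - 1 := by omega
        have hg2 : ¬ (s.length - 1 - 0 < s.length - 1) := by omega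
        rw [if_neg hg1, if_neg hg2]

theorem rev_range (p : Nat) : (List.range p).reverse = (List.range p).map (fun k => p - 1 - k) := by
  rw [List.range_eq_range', List.reverse_range']
  simp [List.range_eq_range']

theorem collapse (s : List Char) :
    (List.range s.length).foldl
        (fun x k => if s.length - 1 - k < s.length - 1 then max x (pvCand s (s.length - 1 - k)) else x) 0
      = (List.range (s.length - 1)).foldl (fun x i => max x (pvCand s i)) 0 := by
  cases hn : s.length with
  | zero => simp
  | succ p =>
    rw [List.range_succ_eq_map]
    simp only [List.foldl_cons, List.foldl_map]
    rw [if_neg (by omega)]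
    have hcongr : (List.range p).foldl
        (fun x k => if p + 1 - 1 - (Nat.succ k) < p + 1 - 1 then
            max x (pvCand s (p + 1 - 1 - (Nat.succ k))) else x) 0
      = (List.range p).foldl (fun x k => max x (pvCand s (p - 1 - k))) 0 := by
      apply PySem.List.foldl_congr_mem
      intro acc k hk
      have hkp : k < p := List.mem_range.mp hk
      rw [if_pos (by omega)]
      congr 2
      omega
    have hfinal : (List.range p).foldl (fun x k => max x (pvCand s (p - 1 - k))) 0
        = (List.range p).foldl (fun x i => max x (pvCand s i)) 0 := by
      have : (List.range p).foldl (fun x k => max x (pvCand s (p - 1 - k))) 0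
          = ((List.range p).map (fun k => p - 1 - k)).foldl (fun x i => max x (pvCand s i)) 0 := by
        rw [List.foldl_map]
      rw [this, ← rev_range, foldl_max_reverse]
    exact hcongr.trans hfinal

theorem portB_eq (stroka : String) :
    find_longest_length_alt stroka =
      (List.range (stroka.toList.length - 1)).foldl
        (fun x i => max x (pvCand stroka.toList i)) 0 := by
  unfold find_longest_length_alt
  dsimp only []
  rw [PySem.List.pyRange_neg_one]
  have h2 : (((stroka.toList.length : Int) - 1) - (-1)).toNat = stroka.toList.length := by omega
  rw [h2]
  have hstep := (B_inv stroka.toList stroka.toList.length le_rfl).2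
  rw [← collapse stroka.toList]
  exact hstep

-- ===== VERDICT (by name: the statement is the Claim_ definition above) =====
theorem find_longest_length_spec : Claim_equal_find_longest_length := by
  intro stroka _
  unfold Spec_find_longest_length
  rw [portA_eq, portB_eq]
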